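-- pv_equiv track=rewrite | github.com/dmarek03/ALGORITHM_AND_DATA_STRUCTURE | colloquiums/col_2022_2023/kol2/kol2.py | beautree
-- ===== SOURCE A (Python) =====
-- def convert_to_edges(graph):
--     edges = []
--     for u in range(len(graph)):
--         for v, w in graph[u]:
--             if u > v:
--                 edges.append([u, v, w])
--     return edges
--
-- def convert_to_directed_unweighted_adj(edges_list: list[list[tuple[int, int, int]]], n) -> list[list[int]]:
--     adj = [[] for _ in range(n)]
--
--     for u, v, w in edges_list:
--         if u > v:
--             adj[v].append(u)
--             adj[u].append(v)
--     return adj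
--
-- def dfs_adj(graph, node, visited, num):
--     if node not in visited:
--         visited.append(node)
--         for n in graph[node]:
--             dfs_adj(graph, n, visited, num)
--     return len(visited) == num
--
-- def get_sum(mst: list[list[tuple[int, int, int]]]) -> int:
--     return sum(edge[2] for edge in mst)
--
-- def beautree(G):
--     n = len(G)
--     E = convert_to_edges(G)
--     E.sort(key=lambda x: x[2])
--
--
--     # while len(E) > n-1:
--     #     current_edges = E[:n-1]
--     #
--     #     weight = kruskal_algorithm(current_edges, n)
--     #     if weight != -1:
--     #         return weight
--     #
--     #     del [E[0]]
--
--
--     # while len(E) > n - 1: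
--     #     total_weight = Kruskal(E, n)
--     #     if total_weight != -1:
--     #         return total_weight
--     #     del [E[0]]
--     while len(E) > n - 1:
--         graph = convert_to_directed_unweighted_adj(E[:n-1], n)
--         is_connected = dfs_adj(graph, 0, [], n)
--         if is_connected:
--             return get_sum(E[:n-1])
--         del [E[0]]
--
--     return None
-- ===== SOURCE B (Python) =====
-- def beautree(G):
--     n = len(G)
--     E = [(u, v, w) for u in range(n) for (v, w) in G[u] if u > v]
--     E.sort(key=lambda e: e[2])
--     m = len(E)
--     for i in range(m - n + 1):
--         window = E[i:i + n - 1]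
--         reach = {0}
--         changed = True
--         while changed:
--             changed = False
--             for (u, v, w) in window:
--                 if (u in reach) != (v in reach):
--                     reach.add(u)
--                     reach.add(v)
--                     changed = True
--         if len(reach) == n:
--             return sum(w for (u, v, w) in window)
--     return None
-- ===== Notes on version B (the rewrite author's own statement) =====
-- stated objective: faster
-- what changed: A repeatedly deletes the head of the sorted edge list (O(E) per step) and, for each window, rebuilds n adjacency lists and runs a recursive visited-list DFS; B slides an index over the unchanged sorted list and decides each window's connectivity by a fixed-point expansion of a reachable-label set over the window's edges (no list mutation, no adjacency structure, no recursion).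
-- outside the precondition, e.g. on beautree([[], [(-3, 1), (-3, 2)], [(0, 9)]]): A returns 3, B returns None; on beautree([]): A raises IndexError, B returns None; on beautree([[], [(-9, 1), (-9, 2)], [(0, 9)]]): A raises IndexError, B returns None
import Mathlib
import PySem

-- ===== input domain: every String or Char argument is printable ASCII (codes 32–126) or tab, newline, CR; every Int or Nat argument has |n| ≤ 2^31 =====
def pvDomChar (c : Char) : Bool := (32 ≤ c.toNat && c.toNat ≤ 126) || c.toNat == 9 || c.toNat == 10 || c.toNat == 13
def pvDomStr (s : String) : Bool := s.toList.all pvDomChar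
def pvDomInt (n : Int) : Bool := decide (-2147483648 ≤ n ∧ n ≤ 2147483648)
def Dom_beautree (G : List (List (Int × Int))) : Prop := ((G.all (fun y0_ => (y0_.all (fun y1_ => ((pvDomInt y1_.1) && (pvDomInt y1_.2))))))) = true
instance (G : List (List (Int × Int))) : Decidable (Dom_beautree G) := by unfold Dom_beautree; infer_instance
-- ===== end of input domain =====

-- B replaces A's destructive delete-loop (rebuild adjacency lists + recursive DFS per window)
-- by an index-sliding window whose connectivity is decided by a fixed-point label-set
-- expansion over the window's edges (no adjacency structure, no recursion, no list mutation).

-- ===== PORT A =====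
-- edges = []; for u in range(len(graph)): for (v, w) in graph[u]: if u > v: edges.append([u, v, w])
def convertToEdges (graph : List (List (Int × Int))) : List (Int × Int × Int) :=
  (PySem.List.pyRange 0 (PySem.List.len graph) 1).foldl (fun edges u =>
    (PySem.List.pyGetD graph u []).foldl (fun acc p =>
      if u > p.1 then acc ++ [(u, p.1, p.2)] else acc) edges) []

-- adj[i].append(x)  (Python would raise IndexError out of range; that is outside Pre_)
def appendAtAdj (adj : List (List Int)) (i x : Int) : List (List Int) :=
  PySem.List.pySetD adj i (PySem.List.pyGetD adj i [] ++ [x])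

-- adj = [[] for _ in range(n)]; for (u, v, w) in edges: if u > v: adj[v].append(u); adj[u].append(v)
def convertAdj (edges : List (Int × Int × Int)) (n : Int) : List (List Int) :=
  edges.foldl (fun adj e =>
    if e.1 > e.2.1 then appendAtAdj (appendAtAdj adj e.2.1 e.1) e.1 e.2.1 else adj)
    (List.replicate n.toNat [])

-- recursive dfs_adj, made total with fuel; fuel (length of g) + 1 is enough: each nesting
-- level of the Python recursion that proceeds has appended one more distinct in-range node
def dfsVisit (g : List (List Int)) : Nat → Int → List Int → List Int
  | 0, _, visited => visited
  | fuel + 1, node, visited =>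
    if node ∈ visited then visited
    else (PySem.List.pyGetD g node []).foldl (fun vis nb => dfsVisit g fuel nb vis) (visited ++ [node])

def dfsAdj (g : List (List Int)) (node : Int) (visited : List Int) (num : Int) : Bool :=
  PySem.List.len (dfsVisit g (g.length + 1) node visited) == num

def getSum (mst : List (Int × Int × Int)) : Int := mst.foldl (fun s e => s + e.2.2) 0

-- while len(E) > n - 1: test first n-1 edges; del E[0]   (E = [] with the guard true is
-- Python's IndexError inside dfs_adj: only G = [], excluded by Pre_)
def beauLoop (n : Int) : List (Int × Int × Int) → Option Int
  | [] => none
  | e :: rest =>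
    if PySem.List.len (e :: rest) > n - 1 then
      let window := PySem.List.slice (e :: rest) none (some (n - 1))
      if dfsAdj (convertAdj window n) 0 [] n then some (getSum window) else beauLoop n rest
    else none

def beautree (G : List (List (Int × Int))) : Option Int :=
  beauLoop (PySem.List.len G)
    (PySem.List.sorted (convertToEdges G) (fun x => x.2.2) false)

-- ===== PORT B =====
-- E = [(u, v, w) for u in range(n) for (v, w) in G[u] if u > v]
def edgesB (G : List (List (Int × Int))) : List (Int × Int × Int) :=
  (PySem.List.pyRange 0 (PySem.List.len G) 1).flatMap (fun u =>
    (PySem.List.pyGetD G u []).filterMap (fun p =>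
      if u > p.1 then some (u, p.1, p.2) else none))

-- one pass of the while-body: for (u, v, w) in window: if (u in reach) != (v in reach): add both
def expandPass (window : List (Int × Int × Int)) (st : PySem.Set Int × Bool) : PySem.Set Int × Bool :=
  window.foldl (fun st e =>
    if (PySem.Set.contains st.1 e.1) != (PySem.Set.contains st.1 e.2.1)
    then (PySem.Set.add (PySem.Set.add st.1 e.1) e.2.1, true)
    else st) st

-- while changed: …, made total with fuel; 2·|window| + 2 is enough: every pass that sets
-- changed strictly grows reach, which stays inside {0} ∪ endpoints of the window
def expandLoop (window : List (Int × Int × Int)) : Nat → PySem.Set Int → PySem.Set Int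
  | 0, r => r
  | fuel + 1, r =>
    let st := expandPass window (r, false)
    if st.2 then expandLoop window fuel st.1 else r

def connectedB (n : Int) (window : List (Int × Int × Int)) : Bool :=
  PySem.Set.len (expandLoop window (2 * window.length + 2) (PySem.Set.ofList [0])) == n

def sumW (window : List (Int × Int × Int)) : Int := (window.map (fun e => e.2.2)).sum

-- for i in range(m - n + 1): window = E[i:i+n-1]; …
def bScan (n : Int) (E : List (Int × Int × Int)) : List Int → Option Int
  | [] => none
  | i :: is =>
    let window := PySem.List.slice E (some i) (some (i + n - 1))
    if connectedB n window then some (sumW window) else bScan n E is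

def beautree_alt (G : List (List (Int × Int))) : Option Int :=
  let n : Int := PySem.List.len G
  let E := PySem.List.sorted (edgesB G) (fun x => x.2.2) false
  bScan n E (PySem.List.pyRange 0 (PySem.List.len E - n + 1) 1)

-- ===== PRECONDITION & SPEC =====
-- number of adjacency entries (v, w) of row u with u > v: the length of A's/B's edge list
def countHeavyPairs (G : List (List (Int × Int))) : Int :=
  ((PySem.List.enumerate G 0).map
    (fun ul => ((ul.2.filter (fun p => decide (ul.1 > p.1))).length : Int))).sum

-- Pre_ restricts to the natural domain of an adjacency-list graph: a non-empty vertex list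
-- (on G = [] A raises IndexError) and non-negative neighbour labels — for a negative label v,
-- A raises IndexError when v < -n, and otherwise its result silently depends on Python's
-- negative-index wraparound identifying v with n + v, a behaviour no caller would specify;
-- B treats such labels as ordinary (unreachable) vertices.  Graphs with at most n - 1
-- edges are admitted regardless of labels: neither program examines any edge there.
def Pre_beautree (G : List (List (Int × Int))) : Prop :=
  G ≠ [] ∧ ((∀ l ∈ G, ∀ p ∈ l, 0 ≤ p.1) ∨ countHeavyPairs G ≤ (G.length : Int) - 1)
instance (G : List (List (Int × Int))) : Decidable (Pre_beautree G) := by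
  unfold Pre_beautree; infer_instance

def pvWitness_beautree : (List (List (Int × Int))) := [[], [(0, 5)]]

def Spec_beautree (G : List (List (Int × Int))) (out : Option Int) : Prop := out = beautree_alt G
instance (G : List (List (Int × Int))) (out : Option Int) : Decidable (Spec_beautree G out) := by
  unfold Spec_beautree; infer_instance

-- ===== CLAIM (what is proved, stated in full; the proofs are below) =====
def Claim_equal_beautree : Prop :=
  ∀ (G : List (List (Int × Int))), Dom_beautree G → Pre_beautree G → Spec_beautree G (beautree G)

-- ===== LEMMAS AND PROOFS =====

-- an edge of the sorted list under Pre_: 0 ≤ v < u < n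
def EdgeOK (n : Int) (e : Int × Int × Int) : Prop := 0 ≤ e.2.1 ∧ e.2.1 < e.1 ∧ e.1 < n

-- undirected adjacency through the window's edges
def Adj (W : List (Int × Int × Int)) (x y : Int) : Prop :=
  ∃ e ∈ W, (e.1 = x ∧ e.2.1 = y) ∨ (e.1 = y ∧ e.2.1 = x)

-- reachability from a through W
inductive ReachF (W : List (Int × Int × Int)) (a : Int) : Int → Prop
  | refl : ReachF W a a
  | step {u v : Int} : ReachF W a u → Adj W u v → ReachF W a v

theorem filterMap_if_eq_filter_map {α β : Type} (l : List α) (p : α → Prop) [DecidablePred p] (f : α → β) :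
    (l.filterMap (fun x => if p x then some (f x) else none))
      = (l.filter (fun x => decide (p x))).map f := by
  induction l with
  | nil => rfl
  | cons a t ih => by_cases h : p a <;> simp [h, ih]

theorem edges_eq (G : List (List (Int × Int))) : convertToEdges G = edgesB G := by
  unfold convertToEdges edgesB
  rw [PySem.List.foldl_congr_mem (g := fun edges u => edges ++
      ((PySem.List.pyGetD G u []).filter (fun p => decide (u > p.1))).map (fun p => (u, p.1, p.2)))]
  · rw [PySem.List.foldl_append_eq_flatMap]
    simp [filterMap_if_eq_filter_map]
  · intro acc u _
    exact PySem.List.foldl_append_ite _ _ _ _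

-- basic facts about reachability
theorem ReachF_trans {W : List (Int × Int × Int)} {a b c : Int}
    (h1 : ReachF W a b) (h2 : ReachF W b c) : ReachF W a c := by
  induction h2 with
  | refl => exact h1
  | step _ hadj ih => exact ReachF.step ih hadj

theorem ReachF_of_adj {W : List (Int × Int × Int)} {a b : Int} (h : Adj W a b) : ReachF W a b :=
  ReachF.step ReachF.refl h

-- ---- adjacency-list construction (A side) ----

theorem length_appendAtAdj (adj : List (List Int)) (i x : Int) :
    (appendAtAdj adj i x).length = adj.length := by
  unfold appendAtAdj
  exact PySem.List.length_pySetD _ _ _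

theorem pyGetD_appendAtAdj (adj : List (List Int)) (i x j : Int)
    (hi0 : 0 ≤ i) (hi : i < adj.length) (hj0 : 0 ≤ j) (_hj : j < adj.length) :
    PySem.List.pyGetD (appendAtAdj adj i x) j []
      = if j = i then PySem.List.pyGetD adj j [] ++ [x] else PySem.List.pyGetD adj j [] := by
  unfold appendAtAdj
  have hi' : i = ((i.toNat : Nat) : Int) := by omega
  have hj' : j = ((j.toNat : Nat) : Int) := by omega
  have hilt : i.toNat < adj.length := by omega
  rw [hi', hj', PySem.List.pyGetD_pySetD_natCast _ _ _ _ _ hilt]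
  split_ifs with h1 h2
  · have : j.toNat = i.toNat := h1
    congr 2
    omega
  · exact absurd (show ((j.toNat : Nat) : Int) = ((i.toNat : Nat) : Int) by exact_mod_cast (show j.toNat = i.toNat by omega)) h2
  · exact absurd (show j.toNat = i.toNat by omega) h1
  · rfl

theorem length_convertAdj_aux (W : List (Int × Int × Int)) : ∀ (adj : List (List Int)),
    (W.foldl (fun adj e =>
      if e.1 > e.2.1 then appendAtAdj (appendAtAdj adj e.2.1 e.1) e.1 e.2.1 else adj) adj).length
      = adj.length := by
  induction W with
  | nil => intro adj; rfl
  | cons e t ih =>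
    intro adj
    rw [List.foldl_cons, ih]
    split_ifs
    · rw [length_appendAtAdj, length_appendAtAdj]
    · rfl

theorem length_convertAdj (W : List (Int × Int × Int)) (n : Int) :
    (convertAdj W n).length = n.toNat := by
  unfold convertAdj
  rw [length_convertAdj_aux, List.length_replicate]

theorem adj_mem_foldl (n : Int) (W : List (Int × Int × Int)) : ∀ (adj : List (List Int)),
    adj.length = n.toNat → (∀ e ∈ W, EdgeOK n e) →
    ∀ x, 0 ≤ x → x < n → ∀ nb,
    (nb ∈ PySem.List.pyGetD (W.foldl (fun adj e =>
        if e.1 > e.2.1 then appendAtAdj (appendAtAdj adj e.2.1 e.1) e.1 e.2.1 else adj) adj) x []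
      ↔ nb ∈ PySem.List.pyGetD adj x [] ∨ Adj W x nb) := by
  induction W with
  | nil =>
    intro adj _ _ x _ _ nb
    simp [Adj]
  | cons e t ih =>
    intro adj hlen hok x hx0 hx nb
    have hOKe := hok e (by simp)
    obtain ⟨hv0, hvu, hun⟩ := hOKe
    have hlen' : (0:Int) < (adj.length : Int) := by omega
    have hvlen : e.2.1 < (adj.length : Int) := by omega
    have hulen : e.1 < (adj.length : Int) := by omega
    have hxlen : x < (adj.length : Int) := by omega
    have hu0 : (0:Int) ≤ e.1 := by omega
    rw [List.foldl_cons]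
    have hfire : e.1 > e.2.1 := hvu
    rw [if_pos hfire]
    have hlen2 : (appendAtAdj (appendAtAdj adj e.2.1 e.1) e.1 e.2.1).length = n.toNat := by
      rw [length_appendAtAdj, length_appendAtAdj, hlen]
    rw [ih _ hlen2 (fun e' he' => hok e' (List.mem_cons_of_mem _ he')) x hx0 hx nb]
    have hlen1 : (appendAtAdj adj e.2.1 e.1).length = adj.length := length_appendAtAdj _ _ _
    rw [pyGetD_appendAtAdj _ _ _ _ hu0 (by omega) hx0 (by omega),
        pyGetD_appendAtAdj _ _ _ _ hv0 (by omega) hx0 (by omega)]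
    constructor
    · rintro (h | h)
      · split_ifs at h with h1 h2 h3
        · rcases List.mem_append.mp h with h' | h'
          · rcases List.mem_append.mp h' with h'' | h''
            · exact Or.inl h''
            · exact Or.inr ⟨e, by simp, Or.inr ⟨(List.mem_singleton.mp h'').symm, h2.symm⟩⟩
          · exact Or.inr ⟨e, by simp, Or.inl ⟨h1.symm, (List.mem_singleton.mp h').symm⟩⟩
        · rcases List.mem_append.mp h with h' | h'
          · exact Or.inl h'
          · exact Or.inr ⟨e, by simp, Or.inl ⟨h1.symm, (List.mem_singleton.mp h').symm⟩⟩
        · rcases List.mem_append.mp h with h' | h'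
          · exact Or.inl h'
          · exact Or.inr ⟨e, by simp, Or.inr ⟨(List.mem_singleton.mp h').symm, h3.symm⟩⟩
        · exact Or.inl h
      · exact Or.inr ⟨h.choose, List.mem_cons_of_mem _ h.choose_spec.1, h.choose_spec.2⟩
    · rintro (h | ⟨e', he', hcase⟩)
      · left
        split_ifs <;> simp [h]
      · rcases List.mem_cons.mp he' with rfl | he''
        · rcases hcase with ⟨h1, h2⟩ | ⟨h1, h2⟩
          · left
            rw [if_pos h1.symm, if_neg (by omega)]
            simp [h2.symm]
          · left
            rw [if_neg (by omega), if_pos h2.symm]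
            simp [h1.symm]
        · right
          exact ⟨e', he'', hcase⟩

theorem adj_mem_iff (n : Int) (W : List (Int × Int × Int)) (hW : ∀ e ∈ W, EdgeOK n e)
    (x : Int) (hx0 : 0 ≤ x) (hx : x < n) (nb : Int) :
    nb ∈ PySem.List.pyGetD (convertAdj W n) x [] ↔ Adj W x nb := by
  unfold convertAdj
  rw [adj_mem_foldl n W _ (List.length_replicate) hW x hx0 hx nb]
  have hbase : PySem.List.pyGetD (List.replicate n.toNat ([] : List Int)) x [] = [] := by
    rw [PySem.List.pyGetD_eq_getElem _ _ hx0 (by simp; omega)]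
    exact List.getElem_replicate _
  simp [hbase]

theorem nodup_bounded_length (r : List Int) (n : Int) (h : r.Nodup)
    (hs : ∀ x ∈ r, 0 ≤ x ∧ x < n) : r.length ≤ n.toNat := by
  have h1 : r.toFinset.card = r.length := List.toFinset_card_of_nodup h
  have h2 : r.toFinset ⊆ Finset.Ico 0 n := by
    intro x hx
    simp only [List.mem_toFinset] at hx
    simp only [Finset.mem_Ico]
    exact hs x hx
  have h3 := Finset.card_le_card h2
  rw [Int.card_Ico] at h3
  omega

-- invariant-carrying specification of the DFS recursion (A side)
theorem dfs_main (n : Int) (W : List (Int × Int × Int)) (g : List (List Int))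
    (hg : g = convertAdj W n) (hW : ∀ e ∈ W, EdgeOK n e) :
    ∀ (fuel : Nat) (node : Int) (visited : List Int),
    visited.Nodup → (∀ y ∈ visited, 0 ≤ y ∧ y < n) → 0 ≤ node → node < n →
    n.toNat + 1 ≤ fuel + visited.length →
    ∃ new, dfsVisit g fuel node visited = visited ++ new ∧
      (visited ++ new).Nodup ∧
      (∀ y ∈ new, 0 ≤ y ∧ y < n) ∧
      node ∈ visited ++ new ∧
      (∀ y ∈ new, ReachF W node y) ∧
      (∀ y ∈ new, ∀ nb, Adj W y nb → nb ∈ visited ++ new) := by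
  intro fuel
  induction fuel with
  | zero =>
    intro node visited hnd hrange _ _ hbudget
    exact absurd (nodup_bounded_length visited n hnd hrange) (by simp at hbudget ⊢; omega)
  | succ fuel IH =>
    intro node visited hnd hrange hnode0 hnoden hbudget
    by_cases hin : node ∈ visited
    · refine ⟨[], by simp [dfsVisit, hin], by simpa using hnd, by simp, by simpa using hin,
        by simp, by simp⟩
    · -- the inner for-loop over the adjacency list of node
      have hadjrange : ∀ x y : Int, Adj W x y → 0 ≤ y ∧ y < n := by
        rintro x y ⟨e, he, ⟨h1, h2⟩ | ⟨h1, h2⟩⟩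
        · obtain ⟨a, b, c⟩ := hW e he
          constructor <;> omega
        · obtain ⟨a, b, c⟩ := hW e he
          constructor <;> omega
      have fold : ∀ (l : List Int), (∀ nb ∈ l, Adj W node nb) →
          ∀ (acc : List Int), acc.Nodup → (∀ y ∈ acc, 0 ≤ y ∧ y < n) →
          n.toNat + 1 ≤ fuel + acc.length →
          ∃ ext, l.foldl (fun vis nb => dfsVisit g fuel nb vis) acc = acc ++ ext ∧
            (acc ++ ext).Nodup ∧ (∀ y ∈ ext, 0 ≤ y ∧ y < n) ∧
            (∀ y ∈ ext, ∃ nb ∈ l, ReachF W nb y) ∧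
            (∀ nb ∈ l, nb ∈ acc ++ ext) ∧
            (∀ y ∈ ext, ∀ nb, Adj W y nb → nb ∈ acc ++ ext) := by
        intro l
        induction l with
        | nil =>
          intro _ acc hnd' hr' _
          exact ⟨[], by simp, by simpa using hnd', by simp, by simp, by simp, by simp⟩
        | cons nb l' ihl =>
          intro hadj acc hnd' hr' hbud'
          have hnbadj : Adj W node nb := hadj nb (by simp)
          have hnbr := hadjrange node nb hnbadj
          obtain ⟨new1, heq1, hnd1, hr1, hmem1, hreach1, hcl1⟩ :=
            IH nb acc hnd' hr' hnbr.1 hnbr.2 hbud'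
          have hacc1r : ∀ y ∈ acc ++ new1, 0 ≤ y ∧ y < n := by
            intro y hy
            rcases List.mem_append.mp hy with h | h
            · exact hr' y h
            · exact hr1 y h
          obtain ⟨ext', heq2, hnd2, hr2, hreach2, hmem2, hcl2⟩ :=
            ihl (fun z hz => hadj z (List.mem_cons_of_mem _ hz)) (acc ++ new1) hnd1 hacc1r
              (by simp; omega)
          refine ⟨new1 ++ ext', ?_, ?_, ?_, ?_, ?_, ?_⟩
          · rw [List.foldl_cons, heq1, heq2, List.append_assoc]
          · rw [← List.append_assoc]; exact hnd2
          · intro y hy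
            rcases List.mem_append.mp hy with h | h
            · exact hr1 y h
            · exact hr2 y h
          · intro y hy
            rcases List.mem_append.mp hy with h | h
            · exact ⟨nb, by simp, hreach1 y h⟩
            · obtain ⟨nb', hnb', hre⟩ := hreach2 y h
              exact ⟨nb', List.mem_cons_of_mem _ hnb', hre⟩
          · intro z hz
            rw [← List.append_assoc]
            rcases List.mem_cons.mp hz with rfl | hz'
            · exact List.mem_append_left _ hmem1
            · exact hmem2 z hz'
          · intro y hy nb' hadj'
            rw [← List.append_assoc]
            rcases List.mem_append.mp hy with h | h
            · exact List.mem_append_left _ (hcl1 y h nb' hadj')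
            · exact hcl2 y h nb' hadj'
      have hlst : ∀ nb ∈ PySem.List.pyGetD g node [], Adj W node nb := by
        intro nb hnb
        exact (adj_mem_iff n W hW node hnode0 hnoden nb).mp (by rw [← hg]; exact hnb)
      have hacc0 : (visited ++ [node]).Nodup := by
        simp only [List.nodup_append, List.nodup_singleton]
        exact ⟨hnd, trivial, fun a ha b hb => by
          rw [List.mem_singleton.mp hb]; exact fun h => hin (h ▸ ha)⟩
      have hacc0r : ∀ y ∈ visited ++ [node], 0 ≤ y ∧ y < n := by
        intro y hy
        rcases List.mem_append.mp hy with h | h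
        · exact hrange y h
        · rw [List.mem_singleton.mp h]; exact ⟨hnode0, hnoden⟩
      obtain ⟨ext, heq, hnd', hr', hreach, hmem, hcl⟩ :=
        fold _ hlst (visited ++ [node]) hacc0 hacc0r (by simp; omega)
      refine ⟨node :: ext, ?_, ?_, ?_, ?_, ?_, ?_⟩
      · show dfsVisit g (fuel + 1) node visited = _
        rw [dfsVisit, if_neg hin, heq, List.append_assoc]
        rfl
      · rw [show visited ++ (node :: ext) = (visited ++ [node]) ++ ext by simp]
        exact hnd'
      · intro y hy
        rcases List.mem_cons.mp hy with rfl | h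
        · exact ⟨hnode0, hnoden⟩
        · exact hr' y h
      · exact List.mem_append_right _ (by simp)
      · intro y hy
        rcases List.mem_cons.mp hy with rfl | h
        · exact ReachF.refl
        · obtain ⟨nb, hnb, hre⟩ := hreach y h
          exact ReachF_trans (ReachF_of_adj (hlst nb hnb)) hre
      · intro y hy nb hadj
        rw [show visited ++ (node :: ext) = (visited ++ [node]) ++ ext by simp]
        rcases List.mem_cons.mp hy with rfl | h
        · have : nb ∈ PySem.List.pyGetD g y [] := by
            rw [hg]
            exact (adj_mem_iff n W hW y hnode0 hnoden nb).mpr hadj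
          exact hmem nb this
        · exact hcl y h nb hadj

theorem dfs_top (n : Int) (W : List (Int × Int × Int)) (hW : ∀ e ∈ W, EdgeOK n e) (hn : 1 ≤ n) :
    (dfsVisit (convertAdj W n) ((convertAdj W n).length + 1) 0 []).Nodup ∧
    (∀ x, x ∈ dfsVisit (convertAdj W n) ((convertAdj W n).length + 1) 0 [] ↔ ReachF W 0 x) := by
  have hlen : (convertAdj W n).length = n.toNat := length_convertAdj W n
  obtain ⟨new, heq, hnd, _, hmem0, hreach, hcl⟩ :=
    dfs_main n W (convertAdj W n) rfl hW ((convertAdj W n).length + 1) 0 []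
      (by simp) (by simp) le_rfl (by omega) (by simp [hlen])
  rw [heq]
  simp only [List.nil_append] at heq hnd hmem0 hcl ⊢
  refine ⟨hnd, fun x => ⟨fun h => hreach x h, fun h => ?_⟩⟩
  induction h with
  | refl => exact hmem0
  | step hr hadj ihr => exact hcl _ ihr _ hadj

-- ---- fixed-point expansion (B side) ----

theorem nodup_subset_length (r s : List Int) (h : r.Nodup) (hs : ∀ x ∈ r, x ∈ s) :
    r.length ≤ s.length := by
  have h1 : r.toFinset.card = r.length := List.toFinset_card_of_nodup h
  have h2 : r.toFinset ⊆ s.toFinset := by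
    intro x hx
    simp only [List.mem_toFinset] at hx ⊢
    exact hs x hx
  have h3 := (Finset.card_le_card h2).trans s.toFinset_card_le
  omega

theorem pass_spec (W : List (Int × Int × Int)) : ∀ (l : List (Int × Int × Int)),
    (∀ e ∈ l, e ∈ W) → ∀ (r : PySem.Set Int) (c : Bool), r.Nodup →
    ∃ ext c', l.foldl (fun st e =>
        if (PySem.Set.contains st.1 e.1) != (PySem.Set.contains st.1 e.2.1)
        then (PySem.Set.add (PySem.Set.add st.1 e.1) e.2.1, true)
        else st) (r, c) = (r ++ ext, c') ∧
      (r ++ ext).Nodup ∧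
      (∀ y ∈ ext, ∃ x ∈ r, ReachF W x y) ∧
      (∀ y ∈ ext, ∃ e ∈ l, y = e.1 ∨ y = e.2.1) ∧
      (c' = false → c = false ∧ ext = [] ∧ ∀ e ∈ l, (e.1 ∈ r ↔ e.2.1 ∈ r)) ∧
      (c = false → c' = true → ext ≠ []) := by
  intro l
  induction l with
  | nil =>
    intro _ r c hnd
    exact ⟨[], c, by simp, by simpa using hnd, by simp, by simp,
      fun h => ⟨h, rfl, by simp⟩, fun h h' => absurd (h ▸ h') (by simp)⟩
  | cons e l' ih =>
    intro hsub r c hnd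
    have hadje : ∀ x y : Int, ((e.1 = x ∧ e.2.1 = y) ∨ (e.1 = y ∧ e.2.1 = x)) → Adj W x y :=
      fun x y h => ⟨e, hsub e (by simp), h⟩
    rw [List.foldl_cons]
    by_cases hcond : (PySem.Set.contains r e.1 != PySem.Set.contains r e.2.1) = true
    · -- the pass fires on e: exactly one endpoint is present, the other is appended
      have hone : (e.1 ∈ r ∧ e.2.1 ∉ r) ∨ (e.1 ∉ r ∧ e.2.1 ∈ r) := by
        by_cases h1 : e.1 ∈ r <;> by_cases h2 : e.2.1 ∈ r <;>
          simp [PySem.Set.contains, h1, h2] at hcond ⊢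
      obtain ⟨miss, pres, hmiss, hpres, hadjmp, hstep⟩ :
          ∃ miss pres : Int, miss ∉ r ∧ pres ∈ r ∧ Adj W pres miss ∧
            PySem.Set.add (PySem.Set.add r e.1) e.2.1 = r ++ [miss] := by
        rcases hone with ⟨h1, h2⟩ | ⟨h1, h2⟩
        · exact ⟨e.2.1, e.1, h2, h1, hadje _ _ (Or.inl ⟨rfl, rfl⟩),
            by rw [PySem.Set.add_of_mem h1, PySem.Set.add_of_not_mem h2]⟩
        · refine ⟨e.1, e.2.1, h1, h2, hadje _ _ (Or.inr ⟨rfl, rfl⟩), ?_⟩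
          rw [PySem.Set.add_of_not_mem h1,
            PySem.Set.add_of_mem (List.mem_append_left _ h2)]
      rw [if_pos hcond, hstep]
      have hnd1 : (r ++ [miss]).Nodup := by
        simp only [List.nodup_append, List.nodup_singleton]
        exact ⟨hnd, trivial, fun a ha b hb => by
          rw [List.mem_singleton.mp hb]; exact fun h => hmiss (h ▸ ha)⟩
      obtain ⟨ext2, c2, heq2, hnd2, hsound2, hsupp2, hfalse2, _⟩ :=
        ih (fun z hz => hsub z (List.mem_cons_of_mem _ hz)) (r ++ [miss]) true hnd1
      refine ⟨miss :: ext2, c2, ?_, ?_, ?_, ?_, ?_, ?_⟩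
      · rw [heq2, List.append_assoc]; rfl
      · rw [show r ++ (miss :: ext2) = (r ++ [miss]) ++ ext2 by simp]; exact hnd2
      · intro y hy
        rcases List.mem_cons.mp hy with rfl | h
        · exact ⟨pres, hpres, ReachF_of_adj hadjmp⟩
        · obtain ⟨x, hx, hre⟩ := hsound2 y h
          rcases List.mem_append.mp hx with hx' | hx'
          · exact ⟨x, hx', hre⟩
          · have hxm := List.mem_singleton.mp hx'
            subst hxm
            exact ⟨pres, hpres, ReachF_trans (ReachF_of_adj hadjmp) hre⟩
      · intro y hy
        rcases List.mem_cons.mp hy with rfl | h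
        · rcases hone with ⟨_, _⟩ | ⟨_, _⟩
          · exact ⟨e, by simp, by simp_all⟩
          · exact ⟨e, by simp, by simp_all⟩
        · obtain ⟨e', he', hor⟩ := hsupp2 y h
          exact ⟨e', List.mem_cons_of_mem _ he', hor⟩
      · intro hc'
        obtain ⟨h1, _, _⟩ := hfalse2 hc'
        exact absurd h1 (by simp)
      · intro _ _
        simp
    · -- the pass does not fire on e: both endpoints on the same side
      rw [if_neg hcond]
      have hbal : e.1 ∈ r ↔ e.2.1 ∈ r := by
        by_cases h1 : e.1 ∈ r <;> by_cases h2 : e.2.1 ∈ r <;>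
          simp [PySem.Set.contains, h1, h2] at hcond ⊢
      obtain ⟨ext2, c2, heq2, hnd2, hsound2, hsupp2, hfalse2, hgrow2⟩ :=
        ih (fun z hz => hsub z (List.mem_cons_of_mem _ hz)) r c hnd
      refine ⟨ext2, c2, heq2, hnd2, hsound2, ?_, ?_, hgrow2⟩
      · intro y hy
        obtain ⟨e', he', hor⟩ := hsupp2 y hy
        exact ⟨e', List.mem_cons_of_mem _ he', hor⟩
      · intro hc'
        obtain ⟨h1, h2, h3⟩ := hfalse2 hc'
        refine ⟨h1, h2, ?_⟩
        intro e' he'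
        rcases List.mem_cons.mp he' with rfl | he''
        · exact hbal
        · exact h3 e' he''

theorem support_mem (W : List (Int × Int × Int)) (y : Int)
    (h : ∃ e ∈ W, y = e.1 ∨ y = e.2.1) :
    y ∈ (0 : Int) :: W.flatMap (fun e => [e.1, e.2.1]) := by
  obtain ⟨e, he, hor⟩ := h
  apply List.mem_cons_of_mem
  rw [List.mem_flatMap]
  exact ⟨e, he, by rcases hor with rfl | rfl <;> simp⟩

theorem support_length (W : List (Int × Int × Int)) :
    ((0 : Int) :: W.flatMap (fun e => [e.1, e.2.1])).length = 2 * W.length + 1 := by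
  induction W with
  | nil => rfl
  | cons e t ih => simp at ih ⊢; omega

theorem loop_spec (W : List (Int × Int × Int)) :
    ∀ (fuel : Nat) (r : PySem.Set Int), r.Nodup → (0:Int) ∈ r →
    (∀ y ∈ r, ReachF W 0 y) →
    (∀ y ∈ r, y ∈ (0 : Int) :: W.flatMap (fun e => [e.1, e.2.1])) →
    2 * W.length + 2 ≤ fuel + r.length →
    (expandLoop W fuel r).Nodup ∧ (∀ x, x ∈ expandLoop W fuel r ↔ ReachF W 0 x) := by
  intro fuel
  induction fuel with
  | zero =>
    intro r hnd h0 hsound hsupp hbud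
    have := nodup_subset_length r _ hnd hsupp
    rw [support_length] at this
    omega
  | succ fuel IH =>
    intro r hnd h0 hsound hsupp hbud
    obtain ⟨ext, c', heq, hnd', hsound', hsupp', hfalse, hgrow⟩ :=
      pass_spec W W (fun e he => he) r false hnd
    have heq' : expandPass W (r, false) = (r ++ ext, c') := heq
    have hunf : expandLoop W (fuel + 1) r
        = (if c' = true then expandLoop W fuel (r ++ ext) else r) := by
      show (let st := expandPass W (r, false); if st.2 then expandLoop W fuel st.1 else r) = _
      rw [heq']
    rcases Bool.eq_false_or_eq_true c' with hc | hc
    · rw [hunf, if_pos hc]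
      have hext : ext ≠ [] := hgrow rfl hc
      apply IH
      · exact hnd'
      · exact List.mem_append_left _ h0
      · intro y hy
        rcases List.mem_append.mp hy with h | h
        · exact hsound y h
        · obtain ⟨x, hx, hre⟩ := hsound' y h
          exact ReachF_trans (hsound x hx) hre
      · intro y hy
        rcases List.mem_append.mp hy with h | h
        · exact hsupp y h
        · exact support_mem W y (hsupp' y h)
      · have : 1 ≤ ext.length := by
          cases ext with
          | nil => exact absurd rfl hext
          | cons a t => simp
        simp only [List.length_append]
        omega
    · obtain ⟨_, hext, hbal⟩ := hfalse hc
      rw [hunf, if_neg (by rw [hc]; simp)]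
      refine ⟨hnd, fun x => ⟨hsound x, fun h => ?_⟩⟩
      induction h with
      | refl => exact h0
      | step hr hadj ihr =>
        obtain ⟨e, he, hor⟩ := hadj
        rcases hor with ⟨h1, h2⟩ | ⟨h1, h2⟩
        · exact h2 ▸ ((hbal e he).mp (h1 ▸ ihr))
        · exact h1 ▸ ((hbal e he).mpr (h2 ▸ ihr))

theorem expand_top (W : List (Int × Int × Int)) :
    (expandLoop W (2 * W.length + 2) (PySem.Set.ofList [0])).Nodup ∧
    (∀ x, x ∈ expandLoop W (2 * W.length + 2) (PySem.Set.ofList [0]) ↔ ReachF W 0 x) := by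
  have h0 : (PySem.Set.ofList [(0:Int)]) = [0] := by decide
  rw [h0]
  apply loop_spec
  · simp
  · simp
  · intro y hy
    rw [List.mem_singleton.mp hy]
    exact ReachF.refl
  · intro y hy
    rw [List.mem_singleton.mp hy]
    simp
  · simp

-- ---- the two connectivity tests agree on every window ----

theorem conn_eq (n : Int) (W : List (Int × Int × Int)) (hW : ∀ e ∈ W, EdgeOK n e)
    (hn : 1 ≤ n) : dfsAdj (convertAdj W n) 0 [] n = connectedB n W := by
  obtain ⟨hndA, hmemA⟩ := dfs_top n W hW hn
  obtain ⟨hndB, hmemB⟩ := expand_top W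
  have hlen : (dfsVisit (convertAdj W n) ((convertAdj W n).length + 1) 0 []).length
      = (expandLoop W (2 * W.length + 2) (PySem.Set.ofList [0])).length :=
    ((List.perm_ext_iff_of_nodup hndA hndB).mpr
      (fun a => (hmemA a).trans (hmemB a).symm)).length_eq
  unfold dfsAdj connectedB PySem.Set.len
  rw [PySem.List.len_eq, hlen]

theorem sum_eq (W : List (Int × Int × Int)) : getSum W = sumW W := by
  unfold getSum sumW
  rw [PySem.List.foldl_add]
  simp

-- ---- the delete-loop of A visits exactly the index windows of B ----

theorem loop_eq (n : Int) (E : List (Int × Int × Int)) (hn : 1 ≤ n)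
    (hE : ∀ e ∈ E, EdgeOK n e) :
    ∀ (k i : Nat), E.length - i ≤ k →
    beauLoop n (E.drop i) = bScan n E (PySem.List.pyRange (i : Int) ((E.length : Int) - n + 1) 1) := by
  intro k
  induction k with
  | zero =>
    intro i hk
    have hi : E.length ≤ i := by omega
    rw [List.drop_eq_nil_of_le hi, PySem.List.pyRange_one_eq_nil (by omega)]
    rfl
  | succ k ih =>
    intro i hk
    by_cases hlt : (i : Int) < (E.length : Int) - n + 1
    · have hiE : i < E.length := by omega
      have hcons := List.drop_eq_getElem_cons hiE
      have hwin : PySem.List.slice E (some (i : Int)) (some ((i : Int) + n - 1))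
          = PySem.List.slice (E.drop i) none (some (n - 1)) := by
        rw [PySem.List.slice_toNat, PySem.List.slice_to _ (by omega)]
        have h2 : ((i : Int) + n - 1).toNat - ((i : Int)).toNat = (n - 1).toNat := by omega
        rw [show ((i : Int)).toNat = i by omega] at h2 ⊢
        rw [h2]
        all_goals omega
      have hWok : ∀ e ∈ PySem.List.slice (E.drop i) none (some (n - 1)), EdgeOK n e := by
        intro e he
        exact hE e (List.mem_of_mem_drop (PySem.List.mem_of_mem_slice _ _ _ he))
      have hguard : PySem.List.len (E[i] :: E.drop (i + 1)) > n - 1 := by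
        rw [PySem.List.len_eq, ← hcons, List.length_drop]
        omega
      rw [hcons, PySem.List.pyRange_one_cons hlt]
      show (if PySem.List.len (E[i] :: E.drop (i + 1)) > n - 1 then _ else _) = _
      rw [if_pos hguard]
      show (if dfsAdj _ 0 [] n then _ else _)
        = (if connectedB n (PySem.List.slice E (some (i : Int)) (some ((i : Int) + n - 1)))
           then some (sumW _) else bScan n E _)
      rw [hwin, ← hcons, conn_eq n _ hWok hn]
      split_ifs with hc
      · rw [sum_eq]
      · rw [show ((i : Int) + 1) = ((i + 1 : Nat) : Int) by push_cast; ring]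
        exact ih (i + 1) (by omega)
    · rw [PySem.List.pyRange_one_eq_nil (by omega)]
      cases hdrop : E.drop i with
      | nil => rfl
      | cons e rest =>
        show (if PySem.List.len (e :: rest) > n - 1 then _ else _) = _
        rw [if_neg ?_]
        · rfl
        · have hlen : (e :: rest).length = E.length - i := by rw [← hdrop, List.length_drop]
          have hiE : i < E.length := by
            by_contra h
            rw [List.drop_eq_nil_of_le (by omega)] at hdrop
            cases hdrop
          rw [PySem.List.len_eq, hlen]
          push_cast [Nat.cast_sub (le_of_lt hiE)]
          omega

theorem edgesB_ok (G : List (List (Int × Int))) (hlab : ∀ l ∈ G, ∀ p ∈ l, 0 ≤ p.1) :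
    ∀ e ∈ edgesB G, EdgeOK ((G.length : Nat) : Int) e := by
  intro e he
  unfold edgesB at he
  rw [List.mem_flatMap] at he
  obtain ⟨u, hu, he⟩ := he
  rw [PySem.List.len_eq, PySem.List.mem_pyRange_one] at hu
  rw [List.mem_filterMap] at he
  obtain ⟨p, hp, hpe⟩ := he
  split_ifs at hpe with hcond
  · have hrow : PySem.List.pyGetD G u [] ∈ G := by
      apply PySem.List.pyGetD_mem
      unfold PySem.Raise.InRange
      omega
    have hv0 := hlab _ hrow p hp
    obtain ⟨rfl⟩ := Option.some_injective _ hpe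
    exact ⟨hv0, hcond, hu.2⟩

-- ===== VERDICT (by name: the statement is the Claim_ definition above) =====
theorem count_eq (G : List (List (Int × Int))) :
    ((edgesB G).length : Int) = countHeavyPairs G := by
  unfold edgesB countHeavyPairs
  rw [PySem.List.enumerate_eq_map_pyRange (d := [])]
  simp [List.length_flatMap, filterMap_if_eq_filter_map]
  rfl

theorem beautree_spec : Claim_equal_beautree := by
  intro G _ hpre
  obtain ⟨hne, hlab | hcnt⟩ := hpre
  case inr =>
    -- at most n - 1 edges: both programs return none without looking at any window
    unfold Spec_beautree beautree beautree_alt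
    rw [edges_eq]
    set E := PySem.List.sorted (edgesB G) (fun x => x.2.2) false with hE
    have hlenE : (E.length : Int) ≤ (G.length : Int) - 1 := by
      rw [hE, PySem.List.length_sorted, count_eq]
      exact hcnt
    have hA : beauLoop ((G.length : Nat) : Int) E = none := by
      cases hEc : E with
      | nil => rfl
      | cons e rest =>
        show (if PySem.List.len (e :: rest) > ((G.length : Nat) : Int) - 1 then _ else _)
          = (none : Option Int)
        rw [if_neg]
        rw [PySem.List.len_eq]
        rw [hEc] at hlenE
        simp at hlenE ⊢
        omega
    have hB : PySem.List.pyRange 0 (((E.length : Nat) : Int) - ((G.length : Nat) : Int) + 1) 1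
        = [] := PySem.List.pyRange_one_eq_nil (by omega)
    show beauLoop ((G.length : Nat) : Int) E
        = bScan ((G.length : Nat) : Int) E
            (PySem.List.pyRange 0 (((E.length : Nat) : Int) - ((G.length : Nat) : Int) + 1) 1)
    rw [hA, hB]
    rfl
  case inl =>
  unfold Spec_beautree beautree beautree_alt
  have hn : 1 ≤ ((G.length : Nat) : Int) := by
    cases G with
    | nil => exact absurd rfl hne
    | cons a t => simp
  rw [edges_eq]
  set E := PySem.List.sorted (edgesB G) (fun x => x.2.2) false with hE
  have hEok : ∀ e ∈ E, EdgeOK ((G.length : Nat) : Int) e := by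
    intro e he
    rw [hE, PySem.List.mem_sorted] at he
    exact edgesB_ok G hlab e he
  have hmain := loop_eq ((G.length : Nat) : Int) E hn hEok E.length 0 (by omega)
  rw [List.drop_zero, show ((0 : Nat) : Int) = 0 by rfl] at hmain
  show beauLoop ((G.length : Nat) : Int) E
      = bScan ((G.length : Nat) : Int) E
          (PySem.List.pyRange 0 (((E.length : Nat) : Int) - ((G.length : Nat) : Int) + 1) 1)
  exact hmain
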